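-- pv_equiv track=rewrite | github.com/magicYang1573/DynamicRTL | CDFG2RTL/src/utils/CDFG_utils.py | fanin_list_is_valid
-- ===== SOURCE A (Python) =====
-- def fanin_list_is_valid(x_data, edge_index, edge_type_dict, fanin_list):
--     for idx, fanins in enumerate(fanin_list):
--         if len(fanins) > 0:
--             temp = edge_type_dict[(fanins[0], idx)]
--             for fanin in fanins:
--                 if temp <= edge_type_dict[(fanin, idx)]:
--                     temp = edge_type_dict[(fanin, idx)]
--                 else:
--                     return False
--     return True
-- ===== SOURCE B (Python) =====
-- def fanin_list_is_valid(x_data, edge_index, edge_type_dict, fanin_list):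
--     for idx, fanins in enumerate(fanin_list):
--         types = [edge_type_dict[(f, idx)] for f in fanins]
--         if types != sorted(types):
--             return False
--     return True
-- ===== Notes on version B (the rewrite author's own statement) =====
-- stated objective: idiomatic
-- what changed: Replaced A's explicit running-maximum pass (temp threaded through an inner loop with an early return) by the sort-and-compare idiom: gather each node's edge types and compare the list with its sorted copy.
-- outside the precondition, e.g. on fanin_list_is_valid([], [], {(1, 0): 5, (2, 0): 3}, [[1, 2, 9]]): A returns False, B raises KeyError
import Mathlib
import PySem

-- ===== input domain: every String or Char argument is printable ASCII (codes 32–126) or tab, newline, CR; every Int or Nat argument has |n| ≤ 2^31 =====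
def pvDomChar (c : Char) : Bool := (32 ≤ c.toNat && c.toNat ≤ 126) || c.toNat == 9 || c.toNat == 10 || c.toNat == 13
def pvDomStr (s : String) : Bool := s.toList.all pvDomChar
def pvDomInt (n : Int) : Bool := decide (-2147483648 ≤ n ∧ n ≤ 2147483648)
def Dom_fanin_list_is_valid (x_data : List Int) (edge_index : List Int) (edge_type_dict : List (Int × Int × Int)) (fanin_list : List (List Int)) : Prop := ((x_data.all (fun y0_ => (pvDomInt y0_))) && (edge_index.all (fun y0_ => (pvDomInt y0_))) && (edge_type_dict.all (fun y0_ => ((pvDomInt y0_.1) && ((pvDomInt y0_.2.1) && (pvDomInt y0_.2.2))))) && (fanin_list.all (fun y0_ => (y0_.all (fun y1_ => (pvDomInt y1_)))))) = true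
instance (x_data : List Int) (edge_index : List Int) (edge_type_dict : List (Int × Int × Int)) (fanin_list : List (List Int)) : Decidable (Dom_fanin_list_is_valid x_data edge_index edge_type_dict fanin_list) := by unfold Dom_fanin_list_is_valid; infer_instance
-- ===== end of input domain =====

-- B replaces A's running-maximum inner loop by the sort-and-compare idiom (types == sorted(types)); same results wherever every needed dict key exists.


-- ===== PORT A =====
-- shared helper: edge_type_dict[(f, idx)] — first matching entry of the association list (Python dict lookup); none = KeyError
def pvLookup (d : List (Int × Int × Int)) (f idx : Int) : Option Int :=
  match d with
  | [] => none
  | (a, b, v) :: rest => if a = f ∧ b = idx then some v else pvLookup rest f idx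

-- A's inner loop: 'for fanin in fanins' threading the running maximum temp
def faninInnerA (d : List (Int × Int × Int)) (idx : Int) (fanins : List Int) (temp : Int) : Bool :=
  match fanins with
  | [] => true
  | f :: rest =>
    match pvLookup d f idx with
    | none => false   -- KeyError in Python; such inputs are excluded by Pre_
    | some v => if temp ≤ v then faninInnerA d idx rest v else false

-- A's outer loop over enumerate(fanin_list)
def faninOuterA (d : List (Int × Int × Int)) (idx : Int) (ls : List (List Int)) : Bool :=
  match ls with
  | [] => true
  | fanins :: rest =>
    match fanins with
    | [] => faninOuterA d (idx + 1) rest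
    | f0 :: _ =>
      match pvLookup d f0 idx with
      | none => false   -- KeyError in Python; excluded by Pre_
      | some t => if faninInnerA d idx fanins t then faninOuterA d (idx + 1) rest else false

def fanin_list_is_valid (x_data : List Int) (edge_index : List Int) (edge_type_dict : List (Int × Int × Int)) (fanin_list : List (List Int)) : Bool :=
  faninOuterA edge_type_dict 0 fanin_list

-- ===== PORT B =====
-- types = [edge_type_dict[(f, idx)] for f in fanins]; getD 0 is exact because Pre_ guarantees every key is present
def faninTypesB (d : List (Int × Int × Int)) (idx : Int) (fanins : List Int) : List Int :=
  fanins.map (fun f => (pvLookup d f idx).getD 0)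

def faninOuterB (d : List (Int × Int × Int)) (idx : Int) (ls : List (List Int)) : Bool :=
  match ls with
  | [] => true
  | fanins :: rest =>
    let ts := faninTypesB d idx fanins
    if ts = PySem.List.sorted ts (fun x => x) false then faninOuterB d (idx + 1) rest else false

def fanin_list_is_valid_alt (x_data : List Int) (edge_index : List Int) (edge_type_dict : List (Int × Int × Int)) (fanin_list : List (List Int)) : Bool :=
  faninOuterB edge_type_dict 0 fanin_list

-- ===== PRECONDITION & SPEC =====
-- Pre_ requires every key (f, idx) with f in fanin_list[idx] to be present in edge_type_dict; Python A raises
-- KeyError on a missing key (except that A may return False first on an earlier violation, where B raises too).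
def Pre_fanin_list_is_valid (x_data : List Int) (edge_index : List Int) (edge_type_dict : List (Int × Int × Int)) (fanin_list : List (List Int)) : Prop :=
  ∀ i, i < fanin_list.length → ∀ f ∈ fanin_list[i]!, ∃ e ∈ edge_type_dict, e.1 = f ∧ e.2.1 = (i : Int)
instance (x_data : List Int) (edge_index : List Int) (edge_type_dict : List (Int × Int × Int)) (fanin_list : List (List Int)) : Decidable (Pre_fanin_list_is_valid x_data edge_index edge_type_dict fanin_list) := by unfold Pre_fanin_list_is_valid; infer_instance

def pvWitness_fanin_list_is_valid : List Int × List Int × (List (Int × Int × Int)) × List (List Int) :=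
  ([], [], [(1, 0, 2), (2, 0, 3)], [[1, 2]])

def Spec_fanin_list_is_valid (x_data : List Int) (edge_index : List Int) (edge_type_dict : List (Int × Int × Int)) (fanin_list : List (List Int)) (out : Bool) : Prop := out = fanin_list_is_valid_alt x_data edge_index edge_type_dict fanin_list
instance (x_data : List Int) (edge_index : List Int) (edge_type_dict : List (Int × Int × Int)) (fanin_list : List (List Int)) (out : Bool) : Decidable (Spec_fanin_list_is_valid x_data edge_index edge_type_dict fanin_list out) := by unfold Spec_fanin_list_is_valid; infer_instance

-- ===== CLAIM (what is proved, stated in full; the proofs are below) =====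
def Claim_equal_fanin_list_is_valid : Prop := ∀ (x_data : List Int) (edge_index : List Int) (edge_type_dict : List (Int × Int × Int)) (fanin_list : List (List Int)), Dom_fanin_list_is_valid x_data edge_index edge_type_dict fanin_list → Pre_fanin_list_is_valid x_data edge_index edge_type_dict fanin_list → Spec_fanin_list_is_valid x_data edge_index edge_type_dict fanin_list (fanin_list_is_valid x_data edge_index edge_type_dict fanin_list)

-- ===== LEMMAS AND PROOFS =====

theorem pvLookup_isSome {d : List (Int × Int × Int)} {f idx : Int}
    (h : ∃ e ∈ d, e.1 = f ∧ e.2.1 = idx) : (pvLookup d f idx).isSome := by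
  induction d with
  | nil => simp at h
  | cons e rest ih =>
    obtain ⟨a, b, v⟩ := e
    rcases h with ⟨e', he', h1, h2⟩
    simp only [List.mem_cons] at he'
    by_cases hk : a = f ∧ b = idx
    · simp [pvLookup, hk]
    · rcases he' with rfl | hmem
      · exact absurd ⟨h1, h2⟩ hk
      · simpa [pvLookup, hk] using ih ⟨e', hmem, h1, h2⟩

theorem innerA_iff_chain (d : List (Int × Int × Int)) (idx : Int) :
    ∀ (fanins : List Int) (temp : Int),
      (∀ f ∈ fanins, (pvLookup d f idx).isSome) →
      (faninInnerA d idx fanins temp = true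
        ↔ List.IsChain (· ≤ ·) (temp :: faninTypesB d idx fanins)) := by
  intro fanins
  induction fanins with
  | nil => intro temp _; simp [faninInnerA, faninTypesB, List.isChain_singleton]
  | cons f rest ih =>
    intro temp h
    have hf : (pvLookup d f idx).isSome := h f (by simp)
    obtain ⟨v, hv⟩ := Option.isSome_iff_exists.mp hf
    have hrest : ∀ g ∈ rest, (pvLookup d g idx).isSome := fun g hg => h g (by simp [hg])
    by_cases hle : temp ≤ v
    · simp [faninInnerA, hv, hle, ih v hrest, faninTypesB, List.isChain_cons_cons]
    · simp [faninInnerA, hv, hle, faninTypesB, List.isChain_cons_cons]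

theorem pairwise_iff_sorted (ts : List Int) :
    ts.Pairwise (· ≤ ·) ↔ ts = PySem.List.sorted ts (fun x => x) false := by
  constructor
  · intro h
    exact (PySem.List.sorted_eq_self_of_pairwise ts (fun x => x) h).symm
  · intro h
    rw [h]
    exact PySem.List.sorted_pairwise ts (fun x => x)

theorem outer_eq (d : List (Int × Int × Int)) :
    ∀ (ls : List (List Int)) (idx : Int),
      (∀ j, j < ls.length → ∀ f ∈ ls[j]!, (pvLookup d f (idx + j)).isSome) →
      faninOuterA d idx ls = faninOuterB d idx ls := by
  intro ls
  induction ls with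
  | nil => intro idx _; rfl
  | cons fanins rest ih =>
    intro idx h
    have h0 : ∀ f ∈ fanins, (pvLookup d f idx).isSome := by
      intro f hf
      simpa using h 0 (by simp) f (by simp [hf])
    have hrest : ∀ j, j < rest.length → ∀ f ∈ rest[j]!, (pvLookup d f ((idx + 1) + j)).isSome := by
      intro j hj f hf
      have := h (j + 1) (by simpa using Nat.succ_lt_succ hj) f (by simpa using hf)
      have harith : idx + ((j : Int) + 1) = idx + 1 + j := by ring
      simpa [harith] using this
    match fanins, h0 with
    | [], _ =>
      simp [faninOuterA, faninOuterB, faninTypesB, PySem.List.sorted, ih (idx + 1) hrest]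
    | f0 :: tl, h0 =>
      have hf0 : (pvLookup d f0 idx).isSome := h0 f0 (by simp)
      obtain ⟨t0, ht0⟩ := Option.isSome_iff_exists.mp hf0
      have hts : faninTypesB d idx (f0 :: tl) = t0 :: faninTypesB d idx tl := by
        simp [faninTypesB, ht0]
      have hiff : faninInnerA d idx (f0 :: tl) t0 = true
          ↔ faninTypesB d idx (f0 :: tl)
              = PySem.List.sorted (faninTypesB d idx (f0 :: tl)) (fun x => x) false := by
        rw [innerA_iff_chain d idx (f0 :: tl) t0 h0, hts, List.isChain_cons_cons,
            ← pairwise_iff_sorted, ← hts]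
        constructor
        · intro hch
          exact List.isChain_iff_pairwise.mp (hts ▸ hch.2)
        · intro hp
          exact ⟨le_refl t0, hts ▸ List.isChain_iff_pairwise.mpr (hts ▸ hp)⟩
      by_cases hc : faninTypesB d idx (f0 :: tl)
          = PySem.List.sorted (faninTypesB d idx (f0 :: tl)) (fun x => x) false
      · simp only [faninOuterA, faninOuterB, ht0, hiff.mpr hc, if_true, if_pos hc]
        exact ih (idx + 1) hrest
      · have hfalse : faninInnerA d idx (f0 :: tl) t0 = false := by
          cases hb : faninInnerA d idx (f0 :: tl) t0
          · rfl
          · exact absurd (hiff.mp hb) hc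
        simp only [faninOuterA, faninOuterB, ht0, hfalse, if_neg hc, Bool.false_eq_true, if_false]

-- ===== VERDICT (by name: the statement is the Claim_ definition above) =====
theorem fanin_list_is_valid_spec : Claim_equal_fanin_list_is_valid := by
  intro x_data edge_index d fl _ hpre
  show fanin_list_is_valid _ _ _ _ = fanin_list_is_valid_alt _ _ _ _
  unfold fanin_list_is_valid fanin_list_is_valid_alt
  apply outer_eq
  intro j hj f hf
  apply pvLookup_isSome
  simpa using hpre j hj f hf
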